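-- pv_equiv track=rewrite | github.com/EmileCadorel/WaaS | comparison/argo/montage_619/convert.py | retreiveTree
-- ===== SOURCE A (Python) =====
-- def hasOutput (task, files) :
--     if "output" in task :
--         for o in task ["output"] :
--             if o in files :
--                 return True
--     return False
--
-- def retreiveTree (tasks) :
--     tree = {}
--     for i in range (0, len (tasks)) :
--         tree [i] = []
--         for j in range (0, len (tasks)) :
--             if i != j :
--                 if "input" in tasks [i] :
--                     if hasOutput (tasks [j], tasks [i] ["input"]) :
--                         tree [i] = tree [i] + [j]
--     return tree
-- ===== SOURCE B (Python) =====
-- def retreiveTree(tasks):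
--     # Index: file name -> set of task indices that produce it (one pass over all outputs).
--     producers = {}
--     for j, task in enumerate(tasks):
--         if "output" in task:
--             for o in task["output"]:
--                 producers.setdefault(o, set()).add(j)
--     tree = {}
--     for i, task in enumerate(tasks):
--         deps = set()
--         if "input" in task:
--             for f in task["input"]:
--                 for j in producers.get(f, ()):
--                     deps.add(j)
--         deps.discard(i)
--         tree[i] = sorted(deps)
--     return tree
-- ===== Notes on version B (the rewrite author's own statement) =====
-- stated objective: alternative
-- what changed: Replaces the all-pairs scan (for each i, test every other task j by scanning j's outputs against i's inputs) with a one-pass inverted index from output file to producer indices, then per task a union over its input files followed by a sort.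
import Mathlib
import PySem

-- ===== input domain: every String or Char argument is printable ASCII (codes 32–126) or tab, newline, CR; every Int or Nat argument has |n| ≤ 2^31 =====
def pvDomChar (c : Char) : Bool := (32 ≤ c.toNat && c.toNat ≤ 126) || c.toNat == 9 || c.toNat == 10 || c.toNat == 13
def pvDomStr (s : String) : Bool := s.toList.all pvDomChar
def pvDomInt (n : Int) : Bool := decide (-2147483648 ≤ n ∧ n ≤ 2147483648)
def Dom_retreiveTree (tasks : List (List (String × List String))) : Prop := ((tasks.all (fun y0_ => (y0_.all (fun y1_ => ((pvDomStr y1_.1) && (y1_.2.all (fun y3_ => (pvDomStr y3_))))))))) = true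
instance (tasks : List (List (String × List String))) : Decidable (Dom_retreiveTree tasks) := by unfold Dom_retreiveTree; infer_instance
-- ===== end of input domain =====

-- B replaces A's all-pairs scan with an inverted index (output file -> producer indices),
-- a per-task union over its inputs and a sort; proved to return the same tree on every input.


-- ===== PORT A =====
-- 'if "output" in task: for o in task["output"]: if o in files: return True; return False'
def hasOutput (task : List (String × List String)) (files : List String) : Bool :=
  match PySem.Dict.get? ⟨task⟩ "output" with
  | some os => os.any (fun o => files.contains o)
  | none => false

-- body of A's inner 'for j' loop
def pvInnerA (tasks : List (List (String × List String))) (i : Int)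
    (tree : PySem.Dict Int (List Int)) (j : Int) : PySem.Dict Int (List Int) :=
  if i ≠ j then
    match PySem.Dict.get? ⟨PySem.List.pyGetD tasks i []⟩ "input" with
    | some files =>
        if hasOutput (PySem.List.pyGetD tasks j []) files then
          tree.insert i (tree.getD i [] ++ [j])
        else tree
    | none => tree
  else tree

-- body of A's outer 'for i' loop: tree[i] = [], then the inner loop
def pvOuterA (tasks : List (List (String × List String)))
    (tree : PySem.Dict Int (List Int)) (i : Int) : PySem.Dict Int (List Int) :=
  (PySem.List.pyRange 0 (tasks.length)).foldl (pvInnerA tasks i) (tree.insert i [])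

def retreiveTree (tasks : List (List (String × List String))) : List (Int × List Int) :=
  ((PySem.List.pyRange 0 (tasks.length)).foldl (pvOuterA tasks) ⟨[]⟩).items

-- ===== PORT B =====
-- 'if "output" in task: for o in task["output"]: producers.setdefault(o, set()).add(j)'
def pvProdStep (prod : PySem.Dict String (PySem.Set Int))
    (p : Int × List (String × List String)) : PySem.Dict String (PySem.Set Int) :=
  match PySem.Dict.get? ⟨p.2⟩ "output" with
  | some os => os.foldl (fun pr o => pr.insert o ((pr.getD o PySem.Set.empty).add p.1)) prod
  | none => prod

-- 'for j in producers.get(f, ()): deps.add(j)'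
def pvDepsStep (prod : PySem.Dict String (PySem.Set Int))
    (deps : PySem.Set Int) (f : String) : PySem.Set Int :=
  (prod.getD f PySem.Set.empty).foldl PySem.Set.add deps

-- one iteration of B's second loop: build deps, discard i, sort
def pvRowB (prod : PySem.Dict String (PySem.Set Int))
    (p : Int × List (String × List String)) : Int × List Int :=
  let deps : PySem.Set Int :=
    match PySem.Dict.get? ⟨p.2⟩ "input" with
    | some fs => fs.foldl (pvDepsStep prod) PySem.Set.empty
    | none => PySem.Set.empty
  (p.1, PySem.List.sorted (deps.discard p.1) (fun x => x))

def retreiveTree_alt (tasks : List (List (String × List String))) : List (Int × List Int) :=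
  let producers := (PySem.List.enumerate tasks).foldl pvProdStep ⟨[]⟩
  (PySem.List.enumerate tasks).map (pvRowB producers)

-- ===== PRECONDITION & SPEC =====
def Spec_retreiveTree (tasks : List (List (String × List String))) (out : List (Int × List Int)) : Prop := out = retreiveTree_alt tasks
instance (tasks : List (List (String × List String))) (out : List (Int × List Int)) : Decidable (Spec_retreiveTree tasks out) := by unfold Spec_retreiveTree; infer_instance

-- ===== CLAIM (what is proved, stated in full; the proofs are below) =====
def Claim_equal_retreiveTree : Prop := ∀ (tasks : List (List (String × List String))), Dom_retreiveTree tasks → Spec_retreiveTree tasks (retreiveTree tasks)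

-- ===== LEMMAS AND PROOFS =====

-- the "output" list of a task ([] when the key is absent)
def outsOf (t : List (String × List String)) : List String :=
  match PySem.Dict.get? ⟨t⟩ "output" with | some os => os | none => []

-- j is a dependency of i (Nat indices)
def depB (tasks : List (List (String × List String))) (i j : Nat) : Bool :=
  decide (i ≠ j) &&
    (match PySem.Dict.get? ⟨tasks.getD i []⟩ "input" with
     | some fs => hasOutput (tasks.getD j []) fs
     | none => false)

-- the value A stores at key i
def rowSpec (tasks : List (List (String × List String))) (i : Nat) : List Int :=
  ((List.range tasks.length).filter (depB tasks i)).map (fun (j : Nat) => (j : Int))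

theorem hasOutput_eq (t : List (String × List String)) (files : List String) :
    hasOutput t files = (outsOf t).any (fun o => files.contains o) := by
  unfold hasOutput outsOf
  cases PySem.Dict.get? ⟨t⟩ "output" <;> simp

-- ---- generic dict facts on a last-entry key ----
theorem dict_get?_last {κ ν : Type} [BEq κ] [LawfulBEq κ] (pre : List (κ × ν)) (k : κ) (v : ν)
    (h : ∀ p ∈ pre, p.1 ≠ k) :
    PySem.Dict.get? ⟨pre ++ [(k, v)]⟩ k = some v := by
  have : List.find? (fun p => p.1 == k) pre = none := by
    rw [List.find?_eq_none]; intro p hp; simpa using h p hp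
  simp [PySem.Dict.get?, List.find?_append, this]

theorem dict_insert_last {κ ν : Type} [BEq κ] [LawfulBEq κ] (pre : List (κ × ν)) (k : κ) (v w : ν)
    (h : ∀ p ∈ pre, p.1 ≠ k) :
    PySem.Dict.insert ⟨pre ++ [(k, v)]⟩ k w = ⟨pre ++ [(k, w)]⟩ := by
  have hc : PySem.Dict.contains (⟨pre ++ [(k, v)]⟩ : PySem.Dict κ ν) k = true := by
    simp [PySem.Dict.contains]
  simp only [PySem.Dict.insert, hc, if_pos]
  congr 1
  rw [List.map_append]
  congr 1
  · have : ∀ p ∈ pre, (if (p.1 == k) = true then (k, w) else p) = id p := by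
      intro p hp; simp [h p hp]
    rw [List.map_congr_left this, List.map_id]
  · simp

theorem dict_insert_fresh {κ ν : Type} [BEq κ] [LawfulBEq κ] (pre : List (κ × ν)) (k : κ) (w : ν)
    (h : ∀ p ∈ pre, p.1 ≠ k) :
    PySem.Dict.insert ⟨pre⟩ k w = ⟨pre ++ [(k, w)]⟩ := by
  have hc : PySem.Dict.contains (⟨pre⟩ : PySem.Dict κ ν) k = false := by
    simp [PySem.Dict.contains]
    intro a b hab
    simpa using h (a, b) hab
  simp [PySem.Dict.insert, hc]

-- ---- A characterised ----
theorem innerA_eq (tasks : List (List (String × List String))) (i : Nat)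
    (js : List Nat) (pre : List (Int × List Int)) (acc : List Int)
    (h : ∀ p ∈ pre, p.1 ≠ (i : Int)) :
    (js.map (fun (j : Nat) => (j : Int))).foldl (pvInnerA tasks (i : Int)) ⟨pre ++ [((i : Int), acc)]⟩
      = ⟨pre ++ [((i : Int), acc ++ (js.filter (depB tasks i)).map (fun (j : Nat) => (j : Int)))]⟩ := by
  induction js generalizing acc with
  | nil => simp
  | cons j js ih =>
    simp only [List.map_cons, List.foldl_cons, List.filter_cons]
    have hstep : pvInnerA tasks (i : Int) ⟨pre ++ [((i : Int), acc)]⟩ (j : Int)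
        = if depB tasks i j then ⟨pre ++ [((i : Int), acc ++ [(j : Int)])]⟩
          else ⟨pre ++ [((i : Int), acc)]⟩ := by
      unfold pvInnerA depB
      simp only [PySem.List.pyGetD_natCast]
      by_cases hij : i = j
      · subst hij; simp
      · have hij' : (i : Int) ≠ (j : Int) := by exact_mod_cast hij
        rw [if_pos hij']
        cases hin : PySem.Dict.get? ⟨tasks.getD i []⟩ "input" with
        | none => simp [hij]
        | some fs =>
          dsimp only
          by_cases hout : hasOutput (tasks.getD j []) fs
          · rw [if_pos hout]
            have hg : PySem.Dict.getD (⟨pre ++ [((i : Int), acc)]⟩ : PySem.Dict Int (List Int))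
                (i : Int) [] = acc := by
              simp [PySem.Dict.getD, dict_get?_last pre (i : Int) acc h]
            rw [hg, dict_insert_last pre (i : Int) acc _ h]
            simp [hij, List.getD] at hout ⊢
            simp [hout]
          · rw [if_neg hout]
            simp [hij, List.getD] at hout ⊢
            simp [hout]
    rw [hstep]
    by_cases hd : depB tasks i j = true
    · rw [if_pos hd, hd, if_pos rfl, ih]
      simp
    · rw [if_neg hd, ih]
      simp only [Bool.not_eq_true] at hd
      rw [hd]
      simp

theorem outerA_eq (tasks : List (List (String × List String))) (m : Nat) :
    ((List.range m).map (fun (i : Nat) => (i : Int))).foldl (pvOuterA tasks) ⟨[]⟩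
      = ⟨(List.range m).map (fun (i : Nat) => ((i : Int), rowSpec tasks i))⟩ := by
  induction m with
  | zero => simp
  | succ m ih =>
    rw [List.range_succ]
    simp only [List.map_append, List.foldl_append, ih, List.map_cons, List.map_nil,
      List.foldl_cons, List.foldl_nil]
    have hfresh : ∀ p ∈ (List.range m).map (fun (i : Nat) => ((i : Int), rowSpec tasks i)),
        p.1 ≠ (m : Int) := by
      intro p hp
      rcases List.mem_map.mp hp with ⟨i, hi, rfl⟩
      have : i < m := List.mem_range.mp hi
      simp only [ne_eq, Int.natCast_inj]
      omega
    unfold pvOuterA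
    rw [dict_insert_fresh _ _ _ hfresh, PySem.List.pyRange_zero_natCast,
      innerA_eq tasks m (List.range tasks.length) _ [] hfresh]
    simp [rowSpec]

theorem A_eq (tasks : List (List (String × List String))) :
    retreiveTree tasks
      = (List.range tasks.length).map (fun (i : Nat) => ((i : Int), rowSpec tasks i)) := by
  unfold retreiveTree
  rw [PySem.List.pyRange_zero_natCast, outerA_eq]

-- ---- B characterised ----
theorem enum_eq (tasks : List (List (String × List String))) (k : Nat) :
    PySem.List.enumerate tasks (k : Int)
      = (List.range tasks.length).map (fun (j : Nat) => (((k + j : Nat) : Int), tasks.getD j [])) := by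
  induction tasks generalizing k with
  | nil => rfl
  | cons t ts ih =>
    have h1 : PySem.List.enumerate (t :: ts) (k : Int)
        = ((k : Int), t) :: PySem.List.enumerate ts ((k : Int) + 1) := rfl
    have h2 : ((k : Int) + 1) = ((k + 1 : Nat) : Int) := by push_cast; ring
    rw [h1, h2, ih]
    rw [show (t :: ts).length = ts.length + 1 from rfl, List.range_succ_eq_map]
    simp only [List.map_cons, List.map_map, Nat.add_zero, List.getD_cons_zero]
    congr 1
    apply List.map_congr_left
    intro j hj
    have hkj : k + 1 + j = k + (j + 1) := by omega
    simp [Function.comp, Nat.succ_eq_add_one, hkj]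

theorem osFold_getD (os : List String) (prod : PySem.Dict String (PySem.Set Int)) (j : Int)
    (f : String) :
    ((os.foldl (fun pr o => pr.insert o ((pr.getD o PySem.Set.empty).add j)) prod).getD f
        PySem.Set.empty)
      = if f ∈ os then (prod.getD f PySem.Set.empty).add j else prod.getD f PySem.Set.empty := by
  induction os generalizing prod with
  | nil => simp
  | cons o os ih =>
    simp only [List.foldl_cons, ih, PySem.Dict.getD_insert, List.mem_cons]
    by_cases h1 : f ∈ os <;> by_cases h2 : f = o <;>
      simp [h1, h2]

def ProdInv (tasks : List (List (String × List String))) (m : Nat)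
    (prod : PySem.Dict String (PySem.Set Int)) : Prop :=
  ∀ f : String, (prod.getD f PySem.Set.empty).Nodup ∧
    ∀ x : Int, x ∈ prod.getD f PySem.Set.empty ↔
      ∃ k < m, x = (k : Int) ∧ f ∈ outsOf (tasks.getD k [])

theorem prodStep_inv (tasks : List (List (String × List String))) (m : Nat)
    (P : PySem.Dict String (PySem.Set Int)) (h : ProdInv tasks m P) :
    ProdInv tasks (m + 1) (pvProdStep P ((m : Int), tasks.getD m [])) := by
  intro f
  obtain ⟨hnd, hmem⟩ := h f
  cases hout : PySem.Dict.get? ⟨tasks.getD m []⟩ "output" with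
  | none =>
    have hstep : pvProdStep P ((m : Int), tasks.getD m []) = P := by
      unfold pvProdStep; rw [hout]
    have houts : outsOf (tasks.getD m []) = [] := by unfold outsOf; rw [hout]
    rw [hstep]
    refine ⟨hnd, fun x => ?_⟩
    rw [hmem]
    constructor
    · rintro ⟨k, hk, rfl, hfo⟩; exact ⟨k, by omega, rfl, hfo⟩
    · rintro ⟨k, hk, rfl, hfo⟩
      have hkm : k ≠ m := by rintro rfl; rw [houts] at hfo; simp at hfo
      exact ⟨k, by omega, rfl, hfo⟩
  | some os =>
    have hstep : pvProdStep P ((m : Int), tasks.getD m [])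
        = os.foldl (fun pr o => pr.insert o ((pr.getD o PySem.Set.empty).add (m : Int))) P := by
      unfold pvProdStep; rw [hout]
    have houts : outsOf (tasks.getD m []) = os := by unfold outsOf; rw [hout]
    rw [hstep]
    constructor
    · rw [osFold_getD]
      split_ifs
      · exact PySem.Set.nodup_add _ _ hnd
      · exact hnd
    · intro x
      rw [osFold_getD]
      by_cases hf : f ∈ os
      · simp only [if_pos hf, PySem.Set.mem_add, hmem]
        constructor
        · rintro (⟨k, hk, rfl, hfo⟩ | rfl)
          · exact ⟨k, by omega, rfl, hfo⟩
          · exact ⟨m, by omega, rfl, by rw [houts]; exact hf⟩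
        · rintro ⟨k, hk, rfl, hfo⟩
          by_cases hkm : k = m
          · subst hkm; right; rfl
          · left; exact ⟨k, by omega, rfl, hfo⟩
      · simp only [if_neg hf, hmem]
        constructor
        · rintro ⟨k, hk, rfl, hfo⟩; exact ⟨k, by omega, rfl, hfo⟩
        · rintro ⟨k, hk, rfl, hfo⟩
          have hkm : k ≠ m := by rintro rfl; rw [houts] at hfo; exact hf hfo
          exact ⟨k, by omega, rfl, hfo⟩

theorem prod_build (tasks : List (List (String × List String))) (m : Nat) :
    ProdInv tasks m
      (((List.range m).map (fun (j : Nat) => ((j : Int), tasks.getD j []))).foldl pvProdStep ⟨[]⟩) := by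
  induction m with
  | zero =>
    intro f
    refine ⟨by simp [PySem.Dict.getD, PySem.Dict.get?, PySem.Set.empty], fun x => ?_⟩
    simp [PySem.Dict.getD, PySem.Dict.get?, PySem.Set.empty]
  | succ m ih =>
    rw [List.range_succ, List.map_append, List.foldl_append]
    simp only [List.map_cons, List.map_nil, List.foldl_cons, List.foldl_nil]
    exact prodStep_inv tasks m _ ih

theorem mem_foldl_add (xs : List Int) (s : PySem.Set Int) (x : Int) :
    x ∈ xs.foldl PySem.Set.add s ↔ x ∈ s ∨ x ∈ xs := by
  induction xs generalizing s with
  | nil => simp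
  | cons y ys ih =>
    simp only [List.foldl_cons, ih, PySem.Set.mem_add, List.mem_cons]
    tauto

theorem nodup_foldl_add (xs : List Int) (s : PySem.Set Int) (h : s.Nodup) :
    (xs.foldl PySem.Set.add s).Nodup := by
  induction xs generalizing s with
  | nil => exact h
  | cons y ys ih => exact ih _ (PySem.Set.nodup_add s y h)

theorem deps_nodup (prod : PySem.Dict String (PySem.Set Int)) (fs : List String)
    (s : PySem.Set Int) (h : s.Nodup) : (fs.foldl (pvDepsStep prod) s).Nodup := by
  induction fs generalizing s with
  | nil => exact h
  | cons f fs ih => exact ih _ (nodup_foldl_add _ _ h)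

theorem mem_deps (prod : PySem.Dict String (PySem.Set Int)) (fs : List String)
    (s : PySem.Set Int) (x : Int) :
    x ∈ fs.foldl (pvDepsStep prod) s ↔ x ∈ s ∨ ∃ f ∈ fs, x ∈ prod.getD f PySem.Set.empty := by
  induction fs generalizing s with
  | nil => simp
  | cons f fs ih =>
    simp only [List.foldl_cons, ih, List.mem_cons]
    unfold pvDepsStep
    rw [mem_foldl_add]
    constructor
    · rintro ((hx | hx) | ⟨g, hg, hx⟩)
      · exact Or.inl hx
      · exact Or.inr ⟨f, Or.inl rfl, hx⟩
      · exact Or.inr ⟨g, Or.inr hg, hx⟩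
    · rintro (hx | ⟨g, hg | hg, hx⟩)
      · exact Or.inl (Or.inl hx)
      · subst hg; exact Or.inl (Or.inr hx)
      · exact Or.inr ⟨g, hg, hx⟩

theorem rowSpec_nodup (tasks : List (List (String × List String))) (i : Nat) :
    (rowSpec tasks i).Nodup := by
  unfold rowSpec
  exact ((List.nodup_range).filter _).map (fun a b => Int.natCast_inj.mp)

theorem rowSpec_pairwise (tasks : List (List (String × List String))) (i : Nat) :
    List.Pairwise (fun a b : Int => a < b) (rowSpec tasks i) := by
  unfold rowSpec
  rw [List.pairwise_map]
  exact (List.pairwise_lt_range.filter _).imp (fun h => by exact_mod_cast h)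

theorem mem_rowSpec (tasks : List (List (String × List String))) (i : Nat) (x : Int) :
    x ∈ rowSpec tasks i ↔ ∃ j, j < tasks.length ∧ x = (j : Int) ∧ depB tasks i j = true := by
  unfold rowSpec
  simp only [List.mem_map, List.mem_filter, List.mem_range]
  constructor
  · rintro ⟨j, ⟨hj, hd⟩, rfl⟩; exact ⟨j, hj, rfl, hd⟩
  · rintro ⟨j, hj, rfl, hd⟩; exact ⟨j, ⟨hj, hd⟩, rfl⟩

theorem rowB_eq (tasks : List (List (String × List String)))
    (prod : PySem.Dict String (PySem.Set Int))
    (hinv : ProdInv tasks tasks.length prod) (i : Nat) :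
    pvRowB prod ((i : Int), tasks.getD i []) = ((i : Int), rowSpec tasks i) := by
  unfold pvRowB
  dsimp only
  congr 1
  cases hin : PySem.Dict.get? ⟨tasks.getD i []⟩ "input" with
  | none =>
    have hrow : rowSpec tasks i = [] := by
      unfold rowSpec
      rw [List.map_eq_nil_iff, List.filter_eq_nil_iff]
      intro j hj
      have hin' : PySem.Dict.get? ⟨tasks[i]?.getD []⟩ "input" = none := by
        simpa [List.getD] using hin
      simp [depB, List.getD, hin']
    rw [hrow]
    exact PySem.List.sorted_eq_of_perm_of_pairwise_lt _ [] _ (by simp [PySem.Set.discard]) (by simp)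
  | some fs =>
    have hdep : ∀ j : Nat, depB tasks i j = true ↔
        i ≠ j ∧ ∃ o ∈ outsOf (tasks.getD j []), o ∈ fs := by
      intro j
      have hin' : PySem.Dict.get? ⟨tasks[i]?.getD []⟩ "input" = some fs := by
        simpa [List.getD] using hin
      simp [depB, List.getD, hin', hasOutput_eq, List.any_eq_true]
    have hmem : ∀ x : Int,
        x ∈ (fs.foldl (pvDepsStep prod) PySem.Set.empty).discard (i : Int) ↔
          x ∈ rowSpec tasks i := by
      intro x
      rw [PySem.Set.mem_discard, mem_deps, mem_rowSpec]
      simp only [PySem.Set.empty, List.not_mem_nil, false_or]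
      constructor
      · rintro ⟨⟨f, hf, hx⟩, hxi⟩
        rcases ((hinv f).2 x).mp hx with ⟨k, hk, rfl, hfo⟩
        refine ⟨k, hk, rfl, (hdep k).mpr ⟨?_, f, hfo, hf⟩⟩
        rintro rfl; exact hxi rfl
      · rintro ⟨j, hj, rfl, hd⟩
        rcases (hdep j).mp hd with ⟨hij, o, ho, hofs⟩
        refine ⟨⟨o, hofs, ((hinv o).2 _).mpr ⟨j, hj, rfl, ho⟩⟩, ?_⟩
        intro hji
        exact hij (Int.natCast_inj.mp hji).symm
    refine PySem.List.sorted_eq_of_perm_of_pairwise_lt _ _ _ ?_ (rowSpec_pairwise tasks i)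
    refine (List.perm_ext_iff_of_nodup (rowSpec_nodup tasks i) ?_).mpr (fun a => (hmem a).symm)
    exact PySem.Set.nodup_discard _ _ (deps_nodup prod fs _ List.nodup_nil)

theorem B_eq (tasks : List (List (String × List String))) :
    retreiveTree_alt tasks
      = (List.range tasks.length).map (fun (i : Nat) => ((i : Int), rowSpec tasks i)) := by
  unfold retreiveTree_alt
  have henum : PySem.List.enumerate tasks 0
      = (List.range tasks.length).map (fun (j : Nat) => ((j : Int), tasks.getD j [])) := by
    have h := enum_eq tasks 0
    simpa using h
  rw [henum, List.map_map]
  apply List.map_congr_left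
  intro i hi
  exact rowB_eq tasks _ (prod_build tasks tasks.length) i

-- ===== VERDICT (by name: the statement is the Claim_ definition above) =====
theorem retreiveTree_spec : Claim_equal_retreiveTree := by
  intro tasks _
  unfold Spec_retreiveTree
  rw [A_eq, B_eq]
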